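-- pv_equiv track=rewrite | github.com/hejackson2/advent_of_code_2022 | day/08/day08.py | visibleGrid
-- ===== SOURCE A (Python) =====
-- def checkVisibility(r,c, grid):
--
--     visible = True
--
--     # top to row
--     fromTheTop = []
--     topVisible = True
--     for y in range(r):
--         fromTheTop.append(grid[y][c])
--         if grid[y][c] >= grid[r][c]:
--             topVisible = False
--             break
--
--     # row to bottom
--     toTheBottom = []
--     bottomVisible = True
--     for y in range(r+1, len(grid)):
--         toTheBottom.append(grid[y][c])
--         if grid[y][c] >= grid[r][c]:
--             bottomVisible = False
--             break
--
--     # left to column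
--     leftVisible = True
--     fromTheLeft = grid[r][:c]
--     for x in fromTheLeft:
--         if x >= grid[r][c]:
--             leftVisible = False
--             break
--
--     # column to right
--     rightVisible = True
--     toTheRight = grid[r][c + 1:]
--     for x in toTheRight:
--         if x >= grid[r][c]:
--             rightVisible = False
--             break
--
--     if (
--         topVisible == False and
--         bottomVisible == False and
--         leftVisible  == False and
--         rightVisible == False
--     ):
--         return False
--
--     else:
--         return True
--
-- def visibleGrid(grid):
--     # get edges
--     right = len(grid[0]) - 1
--     bottom = len(grid) - 1
--
--     # visibility grid: T = visibile, F = not-visible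
--     visible = []
--
--     # walk the grid, every column in every row
--     for r, row in enumerate(grid):
--         # create new row in visible
--         visible.append([])
--
--         for c, col in enumerate(row):
--
--             # handle top row, all visible
--             if r == 0:
--                 visible[r].append('T')
--
--             # handle bottom row, all visible
--             elif r == right:
--                 visible[r].append('T')
--
--             # handle left most column, all visible
--             elif c == 0:
--                 visible[r].append('T')
--
--             elif c == bottom:
--                 visible[r].append('T')
--
--             else:
--                 # testing value
--                 if checkVisibility(r, c, grid) == True:
--                     visible[r].append('T')
--                 else:
--                     visible[r].append('F')
--
--     return visible
-- ===== SOURCE B (Python) =====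
-- def visibleGrid(grid):
--     C = len(grid[0])
--
--     def marks(vals):
--         # visible-from-the-front flags: True where the value beats the running max
--         res = []
--         m = None
--         for v in vals:
--             vis = m is None or v > m
--             res.append(vis)
--             if vis:
--                 m = v
--         return res
--
--     def marks2(vals):
--         # visible from either end of the line
--         back = marks(vals[::-1])[::-1]
--         return [f or b for f, b in zip(marks(vals), back)]
--
--     rows = [marks2(row) for row in grid]
--     cols = [marks2([row[c] for row in grid]) for c in range(C)]
--     return [['T' if rv or cols[c][r] else 'F' for c, rv in enumerate(rowm)]
--             for r, rowm in enumerate(rows)]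
-- ===== Notes on version B (the rewrite author's own statement) =====
-- stated objective: faster
-- what changed: Replaces the per-cell four-directional rescans (O(R+C) per cell) with four linear running-maximum sweeps over rows and columns, marking each cell from precomputed directional flags in O(1).
-- intended difference: On rectangular grids that contain a four-way-blocked (invisible) cell in row C-1 or in column R-1 (only possible when the grid is not square), A's edge shortcut mistakenly compares the row index with the column count (and vice versa) and returns 'T' for that whole line, while B returns 'F' at the blocked cells, which is the intended tree-visibility answer. — e.g. on visibleGrid([[5, 5, 5, 5], [5, 5, 1, 5], [5, 5, 5, 5]]): A returns [["T", "T", "T", "T"], ["T", "F", "T", "T"], ["T", "T", "T", "T"]], B returns [["T", "T", "T", "T"], ["T", "F", "F", "T"], ["T", "T", "T", "T"]]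
-- outside the precondition, e.g. on visibleGrid([[1, 2], [3]]): A returns [['T', 'T'], ['T']], B raises IndexError; on visibleGrid([]): A raises IndexError, B raises IndexError
import Mathlib
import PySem

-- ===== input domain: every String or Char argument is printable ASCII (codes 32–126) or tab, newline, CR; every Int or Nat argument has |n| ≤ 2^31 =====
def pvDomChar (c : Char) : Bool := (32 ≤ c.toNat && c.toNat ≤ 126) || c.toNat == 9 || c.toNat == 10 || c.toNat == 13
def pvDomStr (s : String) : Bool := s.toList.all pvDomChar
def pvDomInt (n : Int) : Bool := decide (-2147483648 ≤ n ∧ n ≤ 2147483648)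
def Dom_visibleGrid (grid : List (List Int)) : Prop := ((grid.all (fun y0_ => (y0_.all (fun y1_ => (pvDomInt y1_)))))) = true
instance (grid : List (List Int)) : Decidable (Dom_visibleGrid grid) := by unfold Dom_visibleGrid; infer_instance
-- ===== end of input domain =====

-- B replaces A's per-cell four-directional rescans by four linear running-maximum
-- sweeps (per row and per column), O(R*C) instead of O(R*C*(R+C)).

-- ===== PORT A =====
-- the 'for x in xs: if x >= v: flag = False; break' loops of checkVisibility
-- (the appended fromTheTop/toTheBottom lists are dead state and are not kept)
def scanVis (v : Int) : List Int → Bool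
  | [] => true
  | x :: t => if v ≤ x then false else scanVis v t

-- same loop over row indices y, reading grid[y][c]
def scanVisIdx (grid : List (List Int)) (c : Int) (v : Int) : List Int → Bool
  | [] => true
  | y :: t =>
    if v ≤ PySem.List.pyGetD (PySem.List.pyGetD grid y []) c 0 then false
    else scanVisIdx grid c v t

def checkVisibility (r c : Int) (grid : List (List Int)) : Bool :=
  let v := PySem.List.pyGetD (PySem.List.pyGetD grid r []) c 0
  let topVisible := scanVisIdx grid c v (PySem.List.pyRange 0 r 1)
  let bottomVisible := scanVisIdx grid c v (PySem.List.pyRange (r + 1) (grid.length : Int) 1)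
  let leftVisible := scanVis v (PySem.List.slice (PySem.List.pyGetD grid r []) none (some c))
  let rightVisible := scanVis v (PySem.List.slice (PySem.List.pyGetD grid r []) (some (c + 1)) none)
  if !topVisible && !bottomVisible && !leftVisible && !rightVisible then false else true

def visibleGrid (grid : List (List Int)) : List (List String) :=
  -- grid[0] raises IndexError on []; that input is outside Pre_ (pyGetD's default is never used inside it)
  let right : Int := ((PySem.List.pyGetD grid 0 []).length : Int) - 1
  let bottom : Int := (grid.length : Int) - 1
  (PySem.List.enumerate grid 0).map (fun p =>
    (PySem.List.enumerate p.2 0).map (fun q =>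
      if p.1 = 0 then "T"
      else if p.1 = right then "T"
      else if q.1 = 0 then "T"
      else if q.1 = bottom then "T"
      else if checkVisibility p.1 q.1 grid then "T" else "F"))

-- ===== PORT B =====
-- marks(vals): visible-from-the-front flags with a running maximum m
def marksAux (m : Option Int) : List Int → List Bool
  | [] => []
  | v :: t =>
    let vis : Bool := m.elim true (fun mv => decide (mv < v))
    vis :: marksAux (if vis then some v else m) t

def marks (vals : List Int) : List Bool := marksAux none vals

-- marks2(vals): visible from either end of the line
def marks2 (vals : List Int) : List Bool :=
  List.zipWith (fun f b => f || b) (marks vals) (marks vals.reverse).reverse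

def visibleGrid_alt (grid : List (List Int)) : List (List String) :=
  -- grid[0] raises IndexError on []; outside Pre_; row[c] in the column comprehension
  -- is in range on every rectangular grid (pyGetD's default is never used inside Pre_)
  let C := (PySem.List.pyGetD grid 0 []).length
  let rows := grid.map marks2
  let cols := (PySem.List.pyRange 0 (C : Int) 1).map
    (fun c => marks2 (grid.map (fun row => PySem.List.pyGetD row c 0)))
  (PySem.List.enumerate rows 0).map (fun p =>
    (PySem.List.enumerate p.2 0).map (fun q =>
      if q.2 || PySem.List.pyGetD (PySem.List.pyGetD cols q.1 []) p.1 false then "T" else "F"))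

-- ===== PRECONDITION & SPEC =====
-- Pre_ restricts to nonempty rectangular grids, the natural domain: on [] A raises
-- IndexError (grid[0]), and on ragged grids A raises IndexError on almost all of them
-- (B raises there too); see claim.json "cites" for the accidental ragged corner A survives.
def Pre_visibleGrid (grid : List (List Int)) : Prop :=
  grid ≠ [] ∧ ∀ row ∈ grid, row.length = (grid.getD 0 []).length

instance (grid : List (List Int)) : Decidable (Pre_visibleGrid grid) := by
  unfold Pre_visibleGrid; infer_instance

def pvWitness_visibleGrid : List (List Int) := [[3, 0, 3], [2, 5, 5], [6, 5, 3]]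

-- line l, position i: blocked on both sides of i by a value ≥ l[i]
def blockedB (l : List Int) (i : Nat) : Bool :=
  (l.take i).any (l.getD i 0 ≤ ·) && (l.drop (i + 1)).any (l.getD i 0 ≤ ·)

-- On grids with a four-way-blocked (invisible) cell in row C-1 or in column R-1 (R rows,
-- C columns; possible only when the grid is not square), A's swapped edge shortcut (row index
-- compared with the column count and vice versa) returns 'T' for that whole line while B
-- returns 'F' at the blocked cells, the intended tree-visibility answer.
def D_visibleGrid (grid : List (List Int)) : Prop :=
  ∃ r < grid.length, ∃ c < (grid.getD r []).length,
    (blockedB (grid.getD r []) c && blockedB (grid.map (·.getD c 0)) r) = true ∧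
    (c + 1 = grid.length ∨ r + 1 = (grid.getD 0 []).length)

instance (grid : List (List Int)) : Decidable (D_visibleGrid grid) := by
  unfold D_visibleGrid; infer_instance

def Spec_visibleGrid (grid : List (List Int)) (out : List (List String)) : Prop :=
  ¬ D_visibleGrid grid → out = visibleGrid_alt grid

instance (grid : List (List Int)) (out : List (List String)) : Decidable (Spec_visibleGrid grid out) := by
  unfold Spec_visibleGrid; infer_instance

def pvDiffWitness_visibleGrid : List (List Int) := [[5, 5, 5, 5], [5, 5, 1, 5], [5, 5, 5, 5]]

def pvDiffWitnessOut_visibleGrid : (List (List String)) × (List (List String)) :=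
  ([["T", "T", "T", "T"], ["T", "F", "T", "T"], ["T", "T", "T", "T"]],
   [["T", "T", "T", "T"], ["T", "F", "F", "T"], ["T", "T", "T", "T"]])

-- ===== CLAIM (what is proved, stated in full; the proofs are below) =====
def Claim_unchanged_visibleGrid : Prop := ∀ (grid : List (List Int)), Dom_visibleGrid grid → Pre_visibleGrid grid → Spec_visibleGrid grid (visibleGrid grid)
def Claim_changed_visibleGrid : Prop := Dom_visibleGrid (pvDiffWitness_visibleGrid) ∧ Pre_visibleGrid (pvDiffWitness_visibleGrid) ∧ D_visibleGrid (pvDiffWitness_visibleGrid) ∧ visibleGrid (pvDiffWitness_visibleGrid) = pvDiffWitnessOut_visibleGrid.1 ∧ visibleGrid_alt (pvDiffWitness_visibleGrid) = pvDiffWitnessOut_visibleGrid.2 ∧ pvDiffWitnessOut_visibleGrid.1 ≠ pvDiffWitnessOut_visibleGrid.2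
def Claim_exact_visibleGrid : Prop := ∀ (grid : List (List Int)), Dom_visibleGrid grid → Pre_visibleGrid grid → D_visibleGrid grid → visibleGrid grid ≠ visibleGrid_alt grid

-- ===== LEMMAS AND PROOFS =====

-- value of cell (r, c) (row index r, column index c)
def cellAt (g : List (List Int)) (r c : Nat) : Int := (g.getD r []).getD c 0

-- per-row value of column c, total version (defaults agree out of range)
theorem col_getD (g : List (List Int)) (c y : Nat) :
    (g.map (fun w => w.getD c 0)).getD y 0 = (g.getD y []).getD c 0 := by
  by_cases hy : y < g.length
  · rw [List.getD_eq_getElem _ _ (by simpa using hy), List.getElem_map,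
      List.getD_eq_getElem _ _ hy]
  · rw [List.getD_eq_default _ _ (by simpa using Nat.le_of_not_lt hy),
      List.getD_eq_default _ _ (Nat.le_of_not_lt hy)]
    simp

theorem any_take_iff (l : List Int) (i : Nat) (w : Int) (hi : i ≤ l.length) :
    ((l.take i).any (fun x => w ≤ x) = true) ↔ ∃ j < i, w ≤ l.getD j 0 := by
  rw [List.any_eq_true]
  constructor
  · rintro ⟨x, hx, hwx⟩
    obtain ⟨j, hj, rfl⟩ := List.mem_iff_getElem.mp hx
    have hji : j < i := by simp [List.length_take] at hj; omega
    refine ⟨j, hji, ?_⟩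
    rw [List.getD_eq_getElem _ _ (by omega)]
    simpa using hwx
  · rintro ⟨j, hj, hwj⟩
    refine ⟨l.getD j 0, ?_, by simpa using hwj⟩
    rw [List.mem_iff_getElem]
    refine ⟨j, by simp [List.length_take]; omega, ?_⟩
    rw [List.getElem_take, List.getD_eq_getElem _ _ (by omega)]

theorem any_drop_iff (l : List Int) (k : Nat) (w : Int) :
    ((l.drop k).any (fun x => w ≤ x) = true) ↔ ∃ j < l.length, k ≤ j ∧ w ≤ l.getD j 0 := by
  rw [List.any_eq_true]
  constructor
  · rintro ⟨x, hx, hwx⟩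
    obtain ⟨j, hj, rfl⟩ := List.mem_iff_getElem.mp hx
    have hjk : k + j < l.length := by simp [List.length_drop] at hj; omega
    refine ⟨k + j, hjk, by omega, ?_⟩
    rw [List.getD_eq_getElem _ _ hjk]
    simpa using hwx
  · rintro ⟨j, hj, hkj, hwj⟩
    refine ⟨l.getD j 0, ?_, by simpa using hwj⟩
    rw [List.mem_iff_getElem]
    refine ⟨j - k, by simp [List.length_drop]; omega, ?_⟩
    rw [List.getElem_drop, List.getD_eq_getElem _ _ (by omega)]
    congr 1
    omega

-- cell (r, c) is blocked in all four directions (a tree ≥ it on every side)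
def HiddenCell (g : List (List Int)) (r c : Nat) : Prop :=
  (∃ y < r, cellAt g r c ≤ cellAt g y c) ∧
  (∃ y < g.length, r < y ∧ cellAt g r c ≤ cellAt g y c) ∧
  (∃ x < c, cellAt g r c ≤ cellAt g r x) ∧
  (∃ x < (g.getD r []).length, c < x ∧ cellAt g r c ≤ cellAt g r x)

theorem D_iff (g : List (List Int)) :
    D_visibleGrid g ↔ ∃ r < g.length, ∃ c < (g.getD r []).length,
      HiddenCell g r c ∧ (c + 1 = g.length ∨ r + 1 = (g.getD 0 []).length) := by
  unfold D_visibleGrid HiddenCell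
  constructor
  · rintro ⟨r, hr, c, hc, hb, hl⟩
    simp only [blockedB, Bool.and_eq_true] at hb
    obtain ⟨⟨hL, hR⟩, hT, hB⟩ := hb
    rw [any_take_iff _ _ _ (le_of_lt hc)] at hL
    rw [any_drop_iff] at hR
    rw [any_take_iff _ _ _ (by simp [List.length_map]; omega)] at hT
    rw [any_drop_iff] at hB
    simp only [col_getD, List.length_map] at hT hB
    refine ⟨r, hr, c, hc, ⟨hT, ?_, hL, ?_⟩, hl⟩
    · obtain ⟨j, hj, hkj, hwj⟩ := hB
      exact ⟨j, hj, by omega, hwj⟩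
    · obtain ⟨j, hj, hkj, hwj⟩ := hR
      exact ⟨j, hj, by omega, hwj⟩
  · rintro ⟨r, hr, c, hc, ⟨hT, hB, hL, hR⟩, hl⟩
    refine ⟨r, hr, c, hc, ?_, hl⟩
    simp only [blockedB, Bool.and_eq_true]
    refine ⟨⟨?_, ?_⟩, ?_, ?_⟩
    · rw [any_take_iff _ _ _ (le_of_lt hc)]
      exact hL
    · rw [any_drop_iff]
      obtain ⟨x, hx, hcx, hwx⟩ := hR
      exact ⟨x, hx, by omega, hwx⟩
    · rw [any_take_iff _ _ _ (by simp [List.length_map]; omega)]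
      simp only [col_getD]
      exact hT
    · rw [any_drop_iff]
      simp only [col_getD, List.length_map]
      obtain ⟨y, hy, hry, hwy⟩ := hB
      exact ⟨y, hy, by omega, hwy⟩

-- cell (r, c) is visible from at least one of the four directions
def VisP (g : List (List Int)) (r c : Nat) : Prop :=
  (∀ y < r, cellAt g y c < cellAt g r c) ∨
  (∀ y < g.length, r < y → cellAt g y c < cellAt g r c) ∨
  (∀ x < c, cellAt g r x < cellAt g r c) ∨
  (∀ x < (g.getD r []).length, c < x → cellAt g r x < cellAt g r c)

theorem not_hidden_iff (g : List (List Int)) (r c : Nat) :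
    ¬ HiddenCell g r c ↔ VisP g r c := by
  unfold HiddenCell VisP
  rw [not_and_or, not_and_or, not_and_or]
  push Not
  exact Iff.rfl

theorem hidden_not_vis (g : List (List Int)) (r c : Nat)
    (h : HiddenCell g r c) : ¬ VisP g r c := by
  intro hv
  rw [← not_hidden_iff] at hv
  exact hv h

theorem scanVis_iff (v : Int) (xs : List Int) :
    scanVis v xs = true ↔ ∀ x ∈ xs, x < v := by
  induction xs with
  | nil => simp [scanVis]
  | cons x t ih =>
    rw [scanVis]
    split_ifs with h
    · simp only [false_iff]
      intro hall
      exact absurd (hall x (by simp)) (not_lt.mpr h)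
    · rw [ih]
      constructor
      · intro hall z hz
        rcases List.mem_cons.mp hz with rfl | hz
        · omega
        · exact hall z hz
      · intro hall z hz
        exact hall z (List.mem_cons_of_mem _ hz)

theorem scanVisIdx_iff (g : List (List Int)) (c v : Int) (ys : List Int) :
    scanVisIdx g c v ys = true ↔
      ∀ y ∈ ys, PySem.List.pyGetD (PySem.List.pyGetD g y []) c 0 < v := by
  induction ys with
  | nil => simp [scanVisIdx]
  | cons y t ih =>
    rw [scanVisIdx]
    split_ifs with h
    · simp only [false_iff]
      intro hall
      exact absurd (hall y (by simp)) (not_lt.mpr h)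
    · rw [ih]
      constructor
      · intro hall z hz
        rcases List.mem_cons.mp hz with rfl | hz
        · omega
        · exact hall z hz
      · intro hall z hz
        exact hall z (List.mem_cons_of_mem _ hz)

theorem if4_iff (a b c d : Bool) :
    ((if !a && !b && !c && !d then false else true) = true ↔
      (a = true ∨ b = true ∨ c = true ∨ d = true)) := by
  cases a <;> cases b <;> cases c <;> cases d <;> simp

theorem all_take_iff (l : List Int) (c : Nat) (w : Int) (hc : c ≤ l.length) :
    (∀ x ∈ l.take c, x < w) ↔ ∀ i < c, l.getD i 0 < w := by
  constructor
  · intro h i hi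
    have hil : i < l.length := by omega
    rw [List.getD_eq_getElem _ _ hil]
    refine h _ ?_
    rw [List.mem_iff_getElem]
    exact ⟨i, by simp [List.length_take]; omega, List.getElem_take ..⟩
  · intro h x hx
    obtain ⟨i, hi, rfl⟩ := List.mem_iff_getElem.mp hx
    have hic : i < c := by simp [List.length_take] at hi; omega
    rw [List.getElem_take]
    have := h i hic
    rwa [List.getD_eq_getElem _ _ (by omega)] at this

theorem all_drop_iff (l : List Int) (k : Nat) (w : Int) :
    (∀ x ∈ l.drop k, x < w) ↔ ∀ i < l.length, k ≤ i → l.getD i 0 < w := by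
  constructor
  · intro h i hi hki
    rw [List.getD_eq_getElem _ _ hi]
    refine h _ ?_
    rw [List.mem_iff_getElem]
    refine ⟨i - k, by simp [List.length_drop]; omega, ?_⟩
    rw [List.getElem_drop]
    congr 1
    omega
  · intro h x hx
    obtain ⟨i, hi, rfl⟩ := List.mem_iff_getElem.mp hx
    have hik : k + i < l.length := by simp [List.length_drop] at hi; omega
    rw [List.getElem_drop]
    have := h (k + i) hik (by omega)
    rwa [List.getD_eq_getElem _ _ (by omega)] at this

set_option maxHeartbeats 1000000 in
theorem checkVisibility_iff (g : List (List Int)) (r c : Nat)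
    (hc : c < (g.getD r []).length) :
    checkVisibility (r : Int) (c : Int) g = true ↔ VisP g r c := by
  unfold checkVisibility
  simp only [PySem.List.pyGetD_natCast]
  rw [if4_iff]
  have hvcell : (g.getD r []).getD c 0 = cellAt g r c := rfl
  have htop : (scanVisIdx g (↑c) ((g.getD r []).getD c 0) (PySem.List.pyRange 0 (↑r) 1) = true ↔
      ∀ y < r, cellAt g y c < cellAt g r c) := by
    rw [scanVisIdx_iff, hvcell]
    constructor
    · intro h y hy
      have hm : ((y : Int)) ∈ PySem.List.pyRange 0 (↑r) 1 := by
        rw [PySem.List.mem_pyRange_one]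
        constructor <;> [positivity; exact_mod_cast hy]
      have := h _ hm
      simpa [PySem.List.pyGetD_natCast, cellAt] using this
    · intro h z hz
      rw [PySem.List.mem_pyRange_one] at hz
      obtain ⟨hz0, hzr⟩ := hz
      have hzn : z = ((z.toNat : Nat) : Int) := by omega
      rw [hzn, PySem.List.pyGetD_natCast, PySem.List.pyGetD_natCast]
      exact h z.toNat (by omega)
  have hbot : (scanVisIdx g (↑c) ((g.getD r []).getD c 0) (PySem.List.pyRange (↑r + 1) (↑g.length) 1) = true ↔
      ∀ y < g.length, r < y → cellAt g y c < cellAt g r c) := by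
    rw [scanVisIdx_iff, hvcell]
    constructor
    · intro h y hylen hry
      have hm : ((y : Int)) ∈ PySem.List.pyRange (↑r + 1) (↑g.length) 1 := by
        rw [PySem.List.mem_pyRange_one]
        constructor <;> [omega; exact_mod_cast hylen]
      have := h _ hm
      simpa [PySem.List.pyGetD_natCast, cellAt] using this
    · intro h z hz
      rw [PySem.List.mem_pyRange_one] at hz
      obtain ⟨hz0, hzr⟩ := hz
      have hzn : z = ((z.toNat : Nat) : Int) := by omega
      rw [hzn, PySem.List.pyGetD_natCast, PySem.List.pyGetD_natCast]
      exact h z.toNat (by omega) (by omega)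
  have hleft : (scanVis ((g.getD r []).getD c 0)
      (PySem.List.slice (g.getD r []) none (some (↑c))) = true ↔
      ∀ x < c, cellAt g r x < cellAt g r c) := by
    rw [PySem.List.slice_to_natCast, scanVis_iff, hvcell,
      all_take_iff _ _ _ (le_of_lt hc)]
    exact Iff.rfl
  have hright : (scanVis ((g.getD r []).getD c 0)
      (PySem.List.slice (g.getD r []) (some (↑c + 1)) none) = true ↔
      ∀ x < (g.getD r []).length, c < x → cellAt g r x < cellAt g r c) := by
    have hcast : ((c : Int) + 1) = ((c + 1 : Nat) : Int) := by push_cast; ring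
    rw [hcast, PySem.List.slice_from_natCast, scanVis_iff, hvcell, all_drop_iff]
    constructor
    · intro h x hx hcx
      exact h x hx (by omega)
    · intro h i hi hki
      exact h i hi (by omega)
  rw [htop, hbot, hleft, hright]
  unfold VisP
  tauto

theorem marksAux_length (m : Option Int) (xs : List Int) :
    (marksAux m xs).length = xs.length := by
  induction xs generalizing m with
  | nil => rfl
  | cons v t ih => simp [marksAux, ih]

theorem marksAux_getD (m : Option Int) (xs : List Int) (i : Nat) (hi : i < xs.length) :
    ((marksAux m xs).getD i false = true ↔
      (∀ a, m = some a → a < xs.getD i 0) ∧ ∀ j < i, xs.getD j 0 < xs.getD i 0) := by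
  induction xs generalizing m i with
  | nil => simp at hi
  | cons v t ih =>
    simp only [marksAux]
    match i with
    | 0 =>
      simp only [List.getD_cons_zero]
      cases m with
      | none => simp
      | some a => simp
    | i + 1 =>
      simp only [List.getD_cons_succ]
      rw [ih _ i (by simpa using hi)]
      have hsplit : (∀ j < i + 1, (v :: t).getD j 0 < t.getD i 0) ↔
          (v < t.getD i 0 ∧ ∀ j < i, t.getD j 0 < t.getD i 0) := by
        constructor
        · intro h
          refine ⟨by simpa using h 0 (by omega), fun j hj => by simpa using h (j+1) (by omega)⟩
        · rintro ⟨h0, h⟩ j hj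
          cases j with
          | zero => simpa using h0
          | succ j => simpa using h j (by omega)
      rw [hsplit]
      cases m with
      | none =>
        simp only [Option.elim, if_true]
        constructor
        · rintro ⟨hopt, ht⟩
          exact ⟨(fun a ha => by cases ha), hopt v rfl, ht⟩
        · rintro ⟨_, hv, ht⟩
          exact ⟨(fun a ha => by obtain rfl := (Option.some_inj.mp ha); exact hv), ht⟩
      | some a =>
        by_cases hav : a < v
        · simp only [Option.elim, decide_eq_true hav, if_true]
          constructor
          · rintro ⟨hopt, ht⟩
            have hv := hopt v rfl
            exact ⟨(fun b hb => by obtain rfl := (Option.some_inj.mp hb); omega), hv, ht⟩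
          · rintro ⟨hopt, hv, ht⟩
            exact ⟨(fun b hb => by obtain rfl := (Option.some_inj.mp hb); exact hv), ht⟩
        · simp only [Option.elim, decide_eq_false hav, Bool.false_eq_true, if_false]
          constructor
          · rintro ⟨hopt, ht⟩
            have ha := hopt a rfl
            exact ⟨(fun b hb => by obtain rfl := (Option.some_inj.mp hb); exact ha), by omega, ht⟩
          · rintro ⟨hopt, hv, ht⟩
            exact ⟨(fun b hb => by obtain rfl := (Option.some_inj.mp hb); exact hopt a rfl), ht⟩

theorem marks2_length (xs : List Int) : (marks2 xs).length = xs.length := by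
  simp [marks2, marks, marksAux_length]

theorem marks2_getD (xs : List Int) (i : Nat) (hi : i < xs.length) :
    ((marks2 xs).getD i false = true ↔
      (∀ j < i, xs.getD j 0 < xs.getD i 0) ∨
      (∀ j < xs.length, i < j → xs.getD j 0 < xs.getD i 0)) := by
  have hlen : (marks2 xs).length = xs.length := marks2_length xs
  have hml : (marks xs).length = xs.length := marksAux_length none xs
  have hmr : ((marks xs.reverse).reverse).length = xs.length := by
    simp [marks, marksAux_length]
  unfold marks2
  rw [List.getD_eq_getElem _ _ (by unfold marks2 at hlen; omega), List.getElem_zipWith]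
  have h1 : (marks xs)[i]'(by omega) = (marks xs).getD i false :=
    (List.getD_eq_getElem _ _ (by omega)).symm
  have h2 : ((marks xs.reverse).reverse)[i]'(by omega) = (marks xs.reverse).getD (xs.length - 1 - i) false := by
    rw [List.getElem_reverse]
    rw [List.getD_eq_getElem _ _ (by simp [marks, marksAux_length]; omega)]
    congr 1
    simp [marks, marksAux_length]
  rw [h1, h2]
  rw [Bool.or_eq_true]
  rw [marks, marksAux_getD none xs i hi]
  rw [marks, marksAux_getD none xs.reverse (xs.length - 1 - i) (by simp; omega)]
  simp only [reduceCtorEq, false_implies, implies_true, true_and]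
  have hrev : ∀ j < xs.length, xs.reverse.getD j 0 = xs.getD (xs.length - 1 - j) 0 := by
    intro j hj
    rw [List.getD_eq_getElem _ _ (by simpa), List.getD_eq_getElem _ _ (by omega), List.getElem_reverse]
  have e0 : xs.reverse.getD (xs.length - 1 - i) 0 = xs.getD i 0 := by
    rw [hrev _ (by omega)]
    congr 1
    omega
  rw [e0]
  constructor
  · rintro (h | h)
    · exact Or.inl h
    · refine Or.inr (fun j hj hij => ?_)
      have := h (xs.length - 1 - j) (by omega)
      rw [hrev _ (by omega)] at this
      have ej : xs.length - 1 - (xs.length - 1 - j) = j := by omega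
      rw [ej] at this
      exact this
  · rintro (h | h)
    · exact Or.inl h
    · refine Or.inr (fun j hj => ?_)
      have hjlen : j < xs.length := by omega
      rw [hrev _ hjlen]
      exact h (xs.length - 1 - j) (by omega) (by omega)

theorem A_length (g : List (List Int)) : (visibleGrid g).length = g.length := by
  simp [visibleGrid, PySem.List.length_enumerate]

theorem A_row (g : List (List Int)) (r : Nat) (hr : r < g.length) :
    (visibleGrid g).getD r [] =
      (PySem.List.enumerate (g.getD r []) 0).map (fun q =>
        if ((r : Int)) = 0 then "T"
        else if (r : Int) = ((PySem.List.pyGetD g 0 []).length : Int) - 1 then "T"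
        else if q.1 = 0 then "T"
        else if q.1 = ((g.length : Int)) - 1 then "T"
        else if checkVisibility (r : Int) q.1 g then "T" else "F") := by
  rw [List.getD_eq_getElem _ _ (by rw [A_length]; exact hr)]
  unfold visibleGrid
  rw [List.getElem_map, PySem.List.getElem_enumerate]
  simp only [zero_add]
  rw [List.getD_eq_getElem _ _ hr]

theorem A_row_length (g : List (List Int)) (r : Nat) (hr : r < g.length) :
    ((visibleGrid g).getD r []).length = (g.getD r []).length := by
  rw [A_row g r hr]
  simp [PySem.List.length_enumerate]

theorem A_entry_eq (g : List (List Int)) (r c : Nat)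
    (hr : r < g.length) (hc : c < (g.getD r []).length) :
    ((visibleGrid g).getD r []).getD c "" =
      (if ((r : Int)) = 0 then "T"
       else if (r : Int) = ((PySem.List.pyGetD g 0 []).length : Int) - 1 then "T"
       else if ((c : Int)) = 0 then "T"
       else if (c : Int) = ((g.length : Int)) - 1 then "T"
       else if checkVisibility (r : Int) (c : Int) g then "T" else "F") := by
  rw [A_row g r hr]
  rw [List.getD_eq_getElem _ _ (by simp [PySem.List.length_enumerate]; exact hc)]
  rw [List.getElem_map, PySem.List.getElem_enumerate]
  simp only [zero_add]

theorem A_entry_iff (g : List (List Int)) (r c : Nat)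
    (hr : r < g.length) (hc : c < (g.getD r []).length) :
    (((visibleGrid g).getD r []).getD c "" = "T" ↔
      r = 0 ∨ (r : Int) = ((g.getD 0 []).length : Int) - 1 ∨ c = 0 ∨
      (c : Int) = (g.length : Int) - 1 ∨ VisP g r c) := by
  rw [A_entry_eq g r c hr hc, PySem.List.pyGetD_zero]
  have hvis := checkVisibility_iff g r c hc
  split_ifs with h1 h2 h3 h4 h5
  · exact iff_of_true rfl (Or.inl (by exact_mod_cast h1))
  · exact iff_of_true rfl (Or.inr (Or.inl h2))
  · exact iff_of_true rfl (Or.inr (Or.inr (Or.inl (by exact_mod_cast h3))))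
  · exact iff_of_true rfl (Or.inr (Or.inr (Or.inr (Or.inl h4))))
  · exact iff_of_true rfl (Or.inr (Or.inr (Or.inr (Or.inr (hvis.mp h5)))))
  · refine iff_of_false (by simp) ?_
    rintro (h | h | h | h | h)
    · exact h1 (by exact_mod_cast h)
    · exact h2 h
    · exact h3 (by exact_mod_cast h)
    · exact h4 h
    · exact h5 (hvis.mpr h)

theorem A_entry_cases (g : List (List Int)) (r c : Nat)
    (hr : r < g.length) (hc : c < (g.getD r []).length) :
    ((visibleGrid g).getD r []).getD c "" = "T" ∨
    ((visibleGrid g).getD r []).getD c "" = "F" := by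
  rw [A_entry_eq g r c hr hc]
  split_ifs <;> simp

theorem B_length (g : List (List Int)) : (visibleGrid_alt g).length = g.length := by
  simp [visibleGrid_alt, PySem.List.length_enumerate]

theorem B_row (g : List (List Int)) (r : Nat) (hr : r < g.length) :
    (visibleGrid_alt g).getD r [] =
      (PySem.List.enumerate (marks2 (g.getD r [])) 0).map (fun q =>
        if q.2 || PySem.List.pyGetD (PySem.List.pyGetD
            ((PySem.List.pyRange 0 (((PySem.List.pyGetD g 0 []).length : Nat) : Int) 1).map
              (fun c => marks2 (g.map (fun row => PySem.List.pyGetD row c 0)))) q.1 [])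
            (↑r) false
        then "T" else "F") := by
  rw [List.getD_eq_getElem _ _ (by rw [B_length]; exact hr)]
  unfold visibleGrid_alt
  rw [List.getElem_map, PySem.List.getElem_enumerate]
  simp only [zero_add, List.getElem_map]
  rw [List.getD_eq_getElem _ _ hr]

theorem B_row_length (g : List (List Int)) (r : Nat) (hr : r < g.length) :
    ((visibleGrid_alt g).getD r []).length = (g.getD r []).length := by
  rw [B_row g r hr]
  simp [PySem.List.length_enumerate, marks2_length]

theorem B_entry_eq (g : List (List Int)) (r c : Nat)
    (hr : r < g.length) (hc : c < (g.getD r []).length) :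
    ((visibleGrid_alt g).getD r []).getD c "" =
      (if (marks2 (g.getD r [])).getD c false || PySem.List.pyGetD (PySem.List.pyGetD
            ((PySem.List.pyRange 0 (((PySem.List.pyGetD g 0 []).length : Nat) : Int) 1).map
              (fun c => marks2 (g.map (fun row => PySem.List.pyGetD row c 0)))) (↑c) [])
            (↑r) false
       then "T" else "F") := by
  rw [B_row g r hr]
  rw [List.getD_eq_getElem _ _ (by simp [PySem.List.length_enumerate, marks2_length]; exact hc)]
  rw [List.getElem_map, PySem.List.getElem_enumerate]
  simp only [zero_add]
  rw [← List.getD_eq_getElem (marks2 (g.getD r [])) false (n := c)]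

theorem B_entry_iff (g : List (List Int)) (hpre : Pre_visibleGrid g) (r c : Nat)
    (hr : r < g.length) (hc : c < (g.getD r []).length) :
    (((visibleGrid_alt g).getD r []).getD c "" = "T" ↔ VisP g r c) := by
  have hrowlen : (g.getD r []).length = (g.getD 0 []).length :=
    hpre.2 _ (by rw [List.getD_eq_getElem _ _ hr]; exact List.getElem_mem _)
  have hcC : c < (g.getD 0 []).length := by omega
  rw [B_entry_eq g r c hr hc]
  rw [PySem.List.pyGetD_zero]
  rw [PySem.List.pyGetD_map_pyRange _ _ c _ hcC]
  rw [PySem.List.pyGetD_natCast]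
  have hmapeq : (g.map fun row => PySem.List.pyGetD row (↑c) 0) = g.map fun row => row.getD c 0 := by
    simp [PySem.List.pyGetD_natCast]
  rw [hmapeq]
  have hcond : ((marks2 (g.getD r [])).getD c false ||
      (marks2 (g.map fun row => row.getD c 0)).getD r false) = true ↔ VisP g r c := by
    rw [Bool.or_eq_true]
    rw [marks2_getD _ c hc]
    rw [marks2_getD _ r (by simpa using hr)]
    have hcol : ∀ y : Nat, (g.map fun row => row.getD c 0).getD y 0 = (g.getD y []).getD c 0 := by
      intro y
      by_cases hy : y < g.length
      · rw [List.getD_eq_getElem _ _ (by simpa using hy), List.getElem_map,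
          List.getD_eq_getElem _ _ hy]
      · rw [List.getD_eq_default _ _ (by simpa using Nat.le_of_not_lt hy),
          List.getD_eq_default _ _ (Nat.le_of_not_lt hy)]
        simp
    simp only [hcol, List.length_map]
    unfold VisP cellAt
    tauto
  split_ifs with h
  · exact iff_of_true rfl (hcond.mp h)
  · exact iff_of_false (by simp) (fun hv => h (hcond.mpr hv))

theorem B_entry_cases (g : List (List Int)) (r c : Nat)
    (hr : r < g.length) (hc : c < (g.getD r []).length) :
    ((visibleGrid_alt g).getD r []).getD c "" = "T" ∨
    ((visibleGrid_alt g).getD r []).getD c "" = "F" := by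
  rw [B_entry_eq g r c hr hc]
  split_ifs <;> simp

theorem getElem_eq_getD {α : Type} (l : List α) (d : α) (i : Nat) (h : i < l.length) :
    l[i] = l.getD i d := (List.getD_eq_getElem l d h).symm

-- ===== VERDICT (by name: the statement is the Claim_ definition above) =====
theorem visibleGrid_spec : Claim_unchanged_visibleGrid := by
  intro g hdom hpre
  unfold Spec_visibleGrid
  intro hnd
  apply List.ext_getElem (by rw [A_length, B_length])
  intro r h1 h2
  have hr : r < g.length := by rwa [A_length] at h1
  rw [getElem_eq_getD _ [] _ h1, getElem_eq_getD _ [] _ h2]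
  apply List.ext_getElem (by rw [A_row_length g r hr, B_row_length g r hr])
  intro c hc1 hc2
  have hc : c < (g.getD r []).length := by rwa [A_row_length g r hr] at hc1
  rw [getElem_eq_getD _ "" _ hc1, getElem_eq_getD _ "" _ hc2]
  have hrowlen : (g.getD r []).length = (g.getD 0 []).length :=
    hpre.2 _ (by rw [List.getD_eq_getElem _ _ hr]; exact List.getElem_mem _)
  by_cases hv : VisP g r c
  · have hBt := (B_entry_iff g hpre r c hr hc).mpr hv
    have hAt := (A_entry_iff g r c hr hc).mpr (Or.inr (Or.inr (Or.inr (Or.inr hv))))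
    rw [hAt, hBt]
  · have hBf : ((visibleGrid_alt g).getD r []).getD c "" = "F" := by
      rcases B_entry_cases g r c hr hc with h | h
      · exact absurd ((B_entry_iff g hpre r c hr hc).mp h) hv
      · exact h
    have hHidden : HiddenCell g r c := by
      by_contra hnh
      exact hv ((not_hidden_iff g r c).mp hnh)
    have hAf : ((visibleGrid g).getD r []).getD c "" = "F" := by
      rcases A_entry_cases g r c hr hc with h | h
      · exfalso
        rcases (A_entry_iff g r c hr hc).mp h with h0 | h0 | h0 | h0 | h0
        · apply hv
          unfold VisP
          exact Or.inl (fun y hy => absurd (h0 ▸ hy) (Nat.not_lt_zero y))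
        · have hr1 : r + 1 = (g.getD 0 []).length := by
            have hC1 : 1 ≤ (g.getD 0 []).length := by omega
            have : (r : Int) + 1 = ((g.getD 0 []).length : Int) := by omega
            exact_mod_cast this
          exact hnd ((D_iff g).mpr ⟨r, hr, c, hc, hHidden, Or.inr hr1⟩)
        · apply hv
          unfold VisP
          exact Or.inr (Or.inr (Or.inl (fun x hx => absurd (h0 ▸ hx) (Nat.not_lt_zero x))))
        · have hc1' : c + 1 = g.length := by
            have : (c : Int) + 1 = (g.length : Int) := by omega
            exact_mod_cast this
          exact hnd ((D_iff g).mpr ⟨r, hr, c, hc, hHidden, Or.inl hc1'⟩)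
        · exact hv h0
      · exact h
    rw [hAf, hBf]

theorem visibleGrid_changed : Claim_changed_visibleGrid := by
  unfold Claim_changed_visibleGrid; decide

theorem visibleGrid_tight : Claim_exact_visibleGrid := by
  intro g hdom hpre hD heq
  obtain ⟨r, hr, c, hc, hhid, hline⟩ := (D_iff g).mp hD
  have hHidden : HiddenCell g r c := hhid
  have hBf : ((visibleGrid_alt g).getD r []).getD c "" = "F" := by
    rcases B_entry_cases g r c hr hc with h | h
    · exact absurd ((B_entry_iff g hpre r c hr hc).mp h) (hidden_not_vis g r c hHidden)
    · exact h
  have hAt : ((visibleGrid g).getD r []).getD c "" = "T" := by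
    refine (A_entry_iff g r c hr hc).mpr ?_
    rcases hline with h | h
    · refine Or.inr (Or.inr (Or.inr (Or.inl ?_)))
      have : c + 1 = g.length := h
      omega
    · refine Or.inr (Or.inl ?_)
      have : r + 1 = (g.getD 0 []).length := h
      omega
  have hcell := congrArg (fun o : List (List String) => (o.getD r []).getD c "") heq
  simp only at hcell
  rw [hAt, hBf] at hcell
  exact absurd hcell (by simp)
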